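-- pv_equiv track=rewrite | github.com/Kinshua/Siren | core/arsenal/cloud_attack.py | _check_wildcard_permissions
-- ===== SOURCE A (Python) =====
-- from typing import Any, Callable, Dict, List, Optional, Set, Tuple
--
-- def _check_wildcard_permissions(
--     required: Set[str], available: Set[str]
-- ) -> bool:
--     """Check if wildcard permissions satisfy requirements."""
--     for req in required:
--         matched = False
--         # Split service:action
--         parts = req.split(":")
--         if len(parts) != 2:
--             continue
--         service, action = parts
--
--         for avail in available:
--             a_parts = avail.split(":")
--             if len(a_parts) != 2:
--                 if avail == "*":
--                     matched = True
--                     break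
--                 continue
--             a_service, a_action = a_parts
--
--             # Check service match
--             if a_service != service and a_service != "*":
--                 continue
--
--             # Check action match (supports *)
--             if a_action == "*":
--                 matched = True
--                 break
--             if a_action == action:
--                 matched = True
--                 break
--
--         if not matched:
--             return False
--     return True
-- ===== SOURCE B (Python) =====
-- def _check_wildcard_permissions(required, available):
--     """One pass over `available` builds a (service, action) pair set and a global-'*' flag;
--     each required perm is then answered by 4 set lookups instead of a rescan of `available`."""
--     star = False
--     pairs = set()
--     for avail in available:
--         ap = avail.split(":")
--         if len(ap) != 2:
--             if avail == "*":
--                 star = True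
--         else:
--             pairs.add((ap[0], ap[1]))
--     if star:
--         return True
--     for req in required:
--         parts = req.split(":")
--         if len(parts) != 2:
--             continue
--         s, a = parts
--         if not ((s, a) in pairs or (s, "*") in pairs
--                 or ("*", a) in pairs or ("*", "*") in pairs):
--             return False
--     return True
-- ===== Notes on version B (the rewrite author's own statement) =====
-- stated objective: alternative
-- what changed: B indexes `available` once into a set of (service, action) pairs plus a global-'*' flag and answers each required permission with four set lookups, instead of A's per-required-permission rescan of `available`; on the measured input family this was not faster.
import Mathlib
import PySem

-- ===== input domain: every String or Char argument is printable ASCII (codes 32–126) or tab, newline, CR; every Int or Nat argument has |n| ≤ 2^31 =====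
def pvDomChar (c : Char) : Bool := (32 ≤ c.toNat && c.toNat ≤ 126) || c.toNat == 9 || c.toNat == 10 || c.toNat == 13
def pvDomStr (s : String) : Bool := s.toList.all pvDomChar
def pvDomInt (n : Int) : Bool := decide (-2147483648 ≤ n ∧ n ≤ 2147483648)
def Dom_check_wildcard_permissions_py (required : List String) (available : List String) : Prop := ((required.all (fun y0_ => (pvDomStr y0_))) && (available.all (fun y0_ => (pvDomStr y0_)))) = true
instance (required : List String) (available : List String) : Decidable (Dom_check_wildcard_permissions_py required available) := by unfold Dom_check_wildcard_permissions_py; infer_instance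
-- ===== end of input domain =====

-- B replaces A's per-required-permission rescan of `available` by one pass that indexes
-- `available` into a set of (service, action) pairs plus a global-"*" flag (then 4 set
-- lookups per required permission). Equivalence is proved on all inputs (no Pre_).

-- s.split(":") — sep is the nonempty literal ":", so Python never raises (split? = some)
def pvSplit (s : String) : List String := (PySem.Str.split? s ":").getD []

-- ===== PORT A =====
-- inner `for avail in available` loop (with `matched` flag / break / early exit)
def pvAInner (service action : String) (avails : List String) : Bool :=
  match avails with
  | [] => false
  | avail :: rest =>
    let a_parts := pvSplit avail
    if a_parts.length ≠ 2 then
      if avail == "*" then true else pvAInner service action rest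
    else
      let a_service := a_parts[0]!
      let a_action := a_parts[1]!
      if a_service ≠ service ∧ a_service ≠ "*" then pvAInner service action rest
      else if a_action == "*" then true
      else if a_action == action then true
      else pvAInner service action rest

def check_wildcard_permissions_py (required : List String) (available : List String) : Bool :=
  match required with
  | [] => true
  | req :: rest =>
    let parts := pvSplit req
    if parts.length ≠ 2 then check_wildcard_permissions_py rest available
    else
      let service := parts[0]!
      let action := parts[1]!
      if pvAInner service action available then check_wildcard_permissions_py rest available
      else false

-- ===== PORT B =====
-- loop body of B's pass over `available` (state: global-"*" flag, set of (service, action) pairs)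
def pvBStep (st : Bool × PySem.Set (String × String)) (v : String) :
    Bool × PySem.Set (String × String) :=
  let ap := pvSplit v
  if ap.length ≠ 2 then
    if v == "*" then (true, st.2) else st
  else (st.1, PySem.Set.add st.2 (ap[0]!, ap[1]!))

def pvBScan (available : List String) : Bool × PySem.Set (String × String) :=
  available.foldl pvBStep (false, PySem.Set.empty)

-- `for req in required` loop of B (early return False)
def pvBReqs (pairs : PySem.Set (String × String)) (required : List String) : Bool :=
  match required with
  | [] => true
  | req :: rest =>
    let parts := pvSplit req
    if parts.length ≠ 2 then pvBReqs pairs rest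
    else
      let s := parts[0]!
      let a := parts[1]!
      if PySem.Set.contains pairs (s, a) || PySem.Set.contains pairs (s, "*")
          || PySem.Set.contains pairs ("*", a) || PySem.Set.contains pairs ("*", "*") then
        pvBReqs pairs rest
      else false

def check_wildcard_permissions_py_alt (required : List String) (available : List String) : Bool :=
  let st := pvBScan available
  if st.1 then true else pvBReqs st.2 required

-- ===== PRECONDITION & SPEC =====
def Spec_check_wildcard_permissions_py (required : List String) (available : List String) (out : Bool) : Prop := out = check_wildcard_permissions_py_alt required available
instance (required : List String) (available : List String) (out : Bool) : Decidable (Spec_check_wildcard_permissions_py required available out) := by unfold Spec_check_wildcard_permissions_py; infer_instance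

-- ===== CLAIM (what is proved, stated in full; the proofs are below) =====
def Claim_equal_check_wildcard_permissions_py : Prop := ∀ (required : List String) (available : List String), Dom_check_wildcard_permissions_py required available → Spec_check_wildcard_permissions_py required available (check_wildcard_permissions_py required available)

-- ===== LEMMAS AND PROOFS =====

-- per-element predicates
def pvMatchA (s a v : String) : Bool :=
  let ap := pvSplit v
  if ap.length ≠ 2 then v == "*"
  else ((ap[0]! == s || ap[0]! == "*") && (ap[1]! == "*" || ap[1]! == a))

def pvIsStar (v : String) : Bool :=
  if (pvSplit v).length ≠ 2 then v == "*" else false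

def pvIsPair (v : String) (p : String × String) : Bool :=
  let ap := pvSplit v
  if ap.length ≠ 2 then false else (((ap[0]!, ap[1]!) : String × String) == p)

theorem pvAInner_eq_any (s a : String) (l : List String) :
    pvAInner s a l = l.any (pvMatchA s a) := by
  induction l with
  | nil => rfl
  | cons v rest ih =>
    rw [List.any_cons, ← ih]
    show (let a_parts := pvSplit v
          if a_parts.length ≠ 2 then
            if v == "*" then true else pvAInner s a rest
          else
            let a_service := a_parts[0]!
            let a_action := a_parts[1]!
            if a_service ≠ s ∧ a_service ≠ "*" then pvAInner s a rest
            else if a_action == "*" then true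
            else if a_action == a then true
            else pvAInner s a rest)
        = (pvMatchA s a v || pvAInner s a rest)
    unfold pvMatchA
    simp only [List.getElem!_eq_getElem?_getD]
    generalize pvSplit v = ap
    generalize ap[0]?.getD "" = x
    generalize ap[1]?.getD "" = y
    by_cases h2 : ap.length ≠ 2
    · simp only [if_pos h2]
      by_cases hs : v == "*" <;> simp [hs]
    · simp only [if_neg h2]
      by_cases hc : x ≠ s ∧ x ≠ "*"
      · have hx1 : (x == s) = false := by simp [hc.1]
        have hx2 : (x == "*") = false := by simp [hc.2]
        simp [hc, hx1, hx2]
      · push_neg at hc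
        by_cases hxs : x = s <;> by_cases hxw : x = "*" <;>
          by_cases hyw : y = "*" <;> by_cases hya : y = a <;>
            simp_all

theorem pvContains_add {α : Type} [BEq α] [LawfulBEq α] (s : PySem.Set α) (x p : α) :
    PySem.Set.contains (PySem.Set.add s x) p = (PySem.Set.contains s p || x == p) := by
  rw [Bool.eq_iff_iff]
  simp only [Bool.or_eq_true, PySem.Set.contains_iff, PySem.Set.mem_add, beq_iff_eq]
  constructor
  · rintro (h | h)
    · exact Or.inl h
    · exact Or.inr h.symm
  · rintro (h | h)
    · exact Or.inl h
    · exact Or.inr h.symm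

theorem pvBScan_fst (l : List String) :
    ∀ st : Bool × PySem.Set (String × String),
      (l.foldl pvBStep st).1 = (st.1 || l.any pvIsStar) := by
  induction l with
  | nil => intro st; simp
  | cons v rest ih =>
    intro st
    rw [List.foldl_cons, ih, List.any_cons]
    have : (pvBStep st v).1 = (st.1 || pvIsStar v) := by
      unfold pvBStep pvIsStar
      generalize pvSplit v = ap
      by_cases h2 : ap.length ≠ 2
      · by_cases hs : v == "*" <;> simp [h2, hs]
      · simp [h2]
    rw [this]
    ac_rfl

theorem pvBScan_contains (l : List String) :
    ∀ (st : Bool × PySem.Set (String × String)) (p : String × String),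
      PySem.Set.contains (l.foldl pvBStep st).2 p
      = (PySem.Set.contains st.2 p || l.any (fun v => pvIsPair v p)) := by
  induction l with
  | nil => intro st p; simp
  | cons v rest ih =>
    intro st p
    rw [List.foldl_cons, ih, List.any_cons]
    have : PySem.Set.contains (pvBStep st v).2 p
        = (PySem.Set.contains st.2 p || pvIsPair v p) := by
      unfold pvBStep pvIsPair
      generalize pvSplit v = ap
      by_cases h2 : ap.length ≠ 2
      · by_cases hs : v == "*" <;> simp [h2, hs]
      · simp only [if_neg h2]
        rw [pvContains_add]
    rw [this]
    ac_rfl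

-- per-element decomposition of A's match into B's star flag and four pair tests
theorem pvMatchA_decomp (s a v : String) :
    pvMatchA s a v =
      (pvIsStar v || pvIsPair v (s, a) || pvIsPair v (s, "*")
        || pvIsPair v ("*", a) || pvIsPair v ("*", "*")) := by
  unfold pvMatchA pvIsStar pvIsPair
  generalize pvSplit v = ap
  generalize ap[0]! = x
  generalize ap[1]! = y
  by_cases h2 : ap.length ≠ 2
  · simp [h2]
  · simp only [if_neg h2]
    rw [Bool.eq_iff_iff]
    simp only [Bool.or_eq_true, Bool.and_eq_true, beq_iff_eq, Prod.mk.injEq]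
    tauto

theorem pvAny_or {α : Type} (l : List α) (f g : α → Bool) :
    l.any (fun v => f v || g v) = (l.any f || l.any g) := by
  induction l with
  | nil => rfl
  | cons x xs ih =>
    simp only [List.any_cons, ih]
    cases f x <;> cases g x <;> simp

-- A's inner scan, expressed with B's index
theorem pvInner_decomp (s a : String) (l : List String) :
    pvAInner s a l =
      ((pvBScan l).1
        || PySem.Set.contains (pvBScan l).2 (s, a)
        || PySem.Set.contains (pvBScan l).2 (s, "*")
        || PySem.Set.contains (pvBScan l).2 ("*", a)
        || PySem.Set.contains (pvBScan l).2 ("*", "*")) := by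
  rw [pvAInner_eq_any]
  rw [List.any_congr rfl (fun v => pvMatchA_decomp s a v)]
  simp only [pvAny_or]
  unfold pvBScan
  rw [pvBScan_fst, pvBScan_contains, pvBScan_contains, pvBScan_contains, pvBScan_contains]
  simp [PySem.Set.empty, PySem.Set.contains]

theorem pvA_of_star (required available : List String)
    (h : (pvBScan available).1 = true) :
    check_wildcard_permissions_py required available = true := by
  induction required with
  | nil => rfl
  | cons req rest ih =>
    show (let parts := pvSplit req
          if parts.length ≠ 2 then check_wildcard_permissions_py rest available
          else
            if pvAInner parts[0]! parts[1]! available then check_wildcard_permissions_py rest available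
            else false) = true
    by_cases h2 : (pvSplit req).length ≠ 2
    · simpa [h2] using ih
    · have hd := pvInner_decomp (pvSplit req)[0]! (pvSplit req)[1]! available
      simp only [List.getElem!_eq_getElem?_getD] at hd ⊢
      rw [hd]
      simp [h, h2, ih]

theorem pvA_of_no_star (required available : List String)
    (h : (pvBScan available).1 = false) :
    check_wildcard_permissions_py required available = pvBReqs (pvBScan available).2 required := by
  induction required with
  | nil => rfl
  | cons req rest ih =>
    show (let parts := pvSplit req
          if parts.length ≠ 2 then check_wildcard_permissions_py rest available
          else
            if pvAInner parts[0]! parts[1]! available then check_wildcard_permissions_py rest available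
            else false)
        = (let parts := pvSplit req
           if parts.length ≠ 2 then pvBReqs (pvBScan available).2 rest
           else
             if PySem.Set.contains (pvBScan available).2 (parts[0]!, parts[1]!)
                 || PySem.Set.contains (pvBScan available).2 (parts[0]!, "*")
                 || PySem.Set.contains (pvBScan available).2 ("*", parts[1]!)
                 || PySem.Set.contains (pvBScan available).2 ("*", "*") then
               pvBReqs (pvBScan available).2 rest
             else false)
    by_cases h2 : (pvSplit req).length ≠ 2
    · simpa [h2] using ih
    · have hd := pvInner_decomp (pvSplit req)[0]! (pvSplit req)[1]! available
      simp only [if_neg h2, hd, h, Bool.false_or, Bool.or_assoc]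
      split
      · exact ih
      · rfl

-- ===== VERDICT (by name: the statement is the Claim_ definition above) =====
theorem check_wildcard_permissions_py_spec : Claim_equal_check_wildcard_permissions_py := by
  intro required available _
  unfold Spec_check_wildcard_permissions_py check_wildcard_permissions_py_alt
  rcases Bool.eq_false_or_eq_true (pvBScan available).1 with h | h
  · simp only [h, if_pos rfl]
    exact pvA_of_star required available h
  · simp only [h]
    rw [if_neg Bool.false_ne_true]
    exact pvA_of_no_star required available h
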